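-- pv_equiv track=rewrite | github.com/nimeob/geo-ranking-ch | src/api/debug_trace.py | normalize_request_id
-- ===== SOURCE A (Python) =====
-- from typing import Any
--
-- def normalize_request_id(raw_value: Any) -> str:
--     """Normalize request id for lookups; invalid values yield an empty string."""
--     candidate = str(raw_value or "").strip()
--     if not candidate:
--         return ""
--     if len(candidate) > 128:
--         return ""
--     if any(character.isspace() for character in candidate):
--         return ""
--     if "," in candidate or ";" in candidate:
--         return ""
--     try:
--         candidate.encode("ascii")
--     except UnicodeEncodeError:
--         return ""
--     return candidate
-- ===== SOURCE B (Python) =====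
-- def normalize_request_id(raw_value):
--     """Normalize request id for lookups; invalid values yield an empty string."""
--     candidate = str(raw_value or "").strip()
--     if not (0 < len(candidate) <= 128):
--         return ""
--     cleaned = "".join(
--         c for c in candidate
--         if ord(c) <= 127 and not c.isspace() and c != "," and c != ";"
--     )
--     return candidate if cleaned == candidate else ""
-- ===== Notes on version B (the rewrite author's own statement) =====
-- stated objective: alternative
-- what changed: Instead of searching the candidate for a forbidden character (A's four scans: any-isspace, two substring searches, an ascii encode attempt), B constructs the filtered string of allowed characters (ASCII, non-space, not comma/semicolon) and returns the candidate only if filtering removed nothing.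
import Mathlib
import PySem

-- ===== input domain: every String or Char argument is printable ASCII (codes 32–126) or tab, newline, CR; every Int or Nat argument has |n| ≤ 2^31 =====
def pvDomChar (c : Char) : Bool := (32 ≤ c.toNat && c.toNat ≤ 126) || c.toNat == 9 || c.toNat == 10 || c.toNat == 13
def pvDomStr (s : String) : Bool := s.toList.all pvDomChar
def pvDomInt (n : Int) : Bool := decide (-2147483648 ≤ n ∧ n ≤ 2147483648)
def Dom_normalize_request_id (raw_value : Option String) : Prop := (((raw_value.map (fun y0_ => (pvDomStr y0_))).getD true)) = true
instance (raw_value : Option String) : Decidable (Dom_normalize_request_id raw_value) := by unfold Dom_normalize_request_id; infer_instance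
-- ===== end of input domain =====

-- B validates by filter-and-compare (rebuild the string from its allowed characters and return the candidate only if nothing was removed) instead of A's four forbidden-character scans; return value only, no side effects involved.

-- ===== PORT A =====
def normalize_request_id (raw_value : Option String) : String :=
  let candidate := PySem.Str.strip (raw_value.getD "")
  if candidate = "" then ""
  else if PySem.Str.len candidate > 128 then ""
  else if candidate.toList.any (fun c => PySem.Chars.isspace c) then ""
  else if PySem.Str.isIn "," candidate || PySem.Str.isIn ";" candidate then ""
  else if candidate.toList.any (fun c => 127 < c.toNat) then ""  -- candidate.encode("ascii") raises UnicodeEncodeError iff a code point exceeds 127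
  else candidate

-- ===== PORT B =====
-- the comprehension filter of Source B: ord(c) <= 127 and not c.isspace() and c != ',' and c != ';'
def pvAllowedChar (c : Char) : Bool :=
  c.toNat ≤ 127 && !PySem.Chars.isspace c && c ≠ ',' && c ≠ ';'

def normalize_request_id_alt (raw_value : Option String) : String :=
  let candidate := PySem.Str.strip (raw_value.getD "")
  if ¬ (0 < PySem.Str.len candidate ∧ PySem.Str.len candidate ≤ 128) then ""
  else
    let cleaned := String.ofList (candidate.toList.filter pvAllowedChar)
    if cleaned = candidate then candidate else ""

-- ===== PRECONDITION & SPEC =====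
def Spec_normalize_request_id (raw_value : Option String) (out : String) : Prop := out = normalize_request_id_alt raw_value
instance (raw_value : Option String) (out : String) : Decidable (Spec_normalize_request_id raw_value out) := by unfold Spec_normalize_request_id; infer_instance

-- ===== CLAIM (what is proved, stated in full; the proofs are below) =====
def Claim_equal_normalize_request_id : Prop := ∀ (raw_value : Option String), Dom_normalize_request_id raw_value → Spec_normalize_request_id raw_value (normalize_request_id raw_value)

-- ===== LEMMAS AND PROOFS =====

-- B's filter removed nothing iff every character is allowed
lemma pvCleaned_eq_iff (s : String) :
    (String.ofList (s.toList.filter pvAllowedChar) = s)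
      ↔ ∀ c ∈ s.toList, pvAllowedChar c = true := by
  constructor
  · intro h
    have h' := congrArg String.toList h
    rw [String.toList_ofList] at h'
    exact fun c hc => List.filter_eq_self.mp h' c hc
  · intro h
    rw [List.filter_eq_self.mpr h, String.ofList_toList]

-- single-character membership: c-as-a-substring of l is c-as-an-element of l
lemma pvIsIn_single (c : Char) (l : List Char) :
    PySem.Chars.isIn [c] l = l.any (fun d => d == c) := by
  by_cases h : c ∈ l
  · rw [List.any_eq_true.mpr ⟨c, h, by simp⟩]
    exact (PySem.Chars.isIn_iff_infix _ _).mpr ((List.singleton_infix_iff c l).mpr h)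
  · rw [List.any_eq_false.mpr (by intro d hd; simp; rintro rfl; exact h hd)]
    rw [PySem.Chars.isIn_eq_false_iff _ _]
    intro hinf
    exact h ((List.singleton_infix_iff c l).mp hinf)

lemma pvStrIsIn_comma (s : String) :
    PySem.Str.isIn "," s = s.toList.any (fun d => d == ',') := by
  rw [PySem.Str.isIn_eq, show (",").toList = [','] from rfl, pvIsIn_single]

lemma pvStrIsIn_semi (s : String) :
    PySem.Str.isIn ";" s = s.toList.any (fun d => d == ';') := by
  rw [PySem.Str.isIn_eq, show (";").toList = [';'] from rfl, pvIsIn_single]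

-- A finds no forbidden character iff every character passes B's filter
lemma pvScan_iff_allowed (s : String) :
    (s.toList.any (fun c => PySem.Chars.isspace c) = false ∧
     (PySem.Str.isIn "," s || PySem.Str.isIn ";" s) = false ∧
     s.toList.any (fun c => 127 < c.toNat) = false)
      ↔ ∀ c ∈ s.toList, pvAllowedChar c = true := by
  rw [pvStrIsIn_comma, pvStrIsIn_semi]
  simp only [Bool.or_eq_false_iff, List.any_eq_false, pvAllowedChar]
  constructor
  · rintro ⟨h1, ⟨h2, h3⟩, h4⟩ c hc
    have a1 := h1 c hc; have a2 := h2 c hc; have a3 := h3 c hc; have a4 := h4 c hc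
    simp_all
  · intro h
    refine ⟨fun c hc => ?_, ⟨fun c hc => ?_, fun c hc => ?_⟩, fun c hc => ?_⟩ <;>
      (have := h c hc; simp_all)

-- the two bodies agree on every stripped candidate string
lemma pvMain (s : String) :
    (if s = "" then ""
     else if PySem.Str.len s > 128 then ""
     else if s.toList.any (fun c => PySem.Chars.isspace c) then ""
     else if PySem.Str.isIn "," s || PySem.Str.isIn ";" s then ""
     else if s.toList.any (fun c => 127 < c.toNat) then ""
     else s)
    = (if ¬ (0 < PySem.Str.len s ∧ PySem.Str.len s ≤ 128) then ""
       else if String.ofList (s.toList.filter pvAllowedChar) = s then s else "") := by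
  by_cases h1 : s = ""
  · subst h1; simp
  have hne : s.toList ≠ [] := fun h => h1 (by rw [← String.ofList_toList (s := s), h])
  have hpos : 0 < PySem.Str.len s := by
    rw [PySem.Str.len_eq]
    exact_mod_cast List.length_pos_iff.mpr hne
  by_cases h2 : PySem.Str.len s > 128
  · rw [if_neg h1, if_pos h2, if_pos (by intro h; omega)]
  rw [if_neg h1, if_neg h2, if_neg (not_not_intro ⟨hpos, by omega⟩)]
  by_cases hgood : ∀ c ∈ s.toList, pvAllowedChar c = true
  · obtain ⟨e1, e2, e3⟩ := (pvScan_iff_allowed s).mpr hgood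
    rw [e1, e2, e3, if_pos ((pvCleaned_eq_iff s).mpr hgood)]
    simp
  · rw [if_neg (fun h => hgood ((pvCleaned_eq_iff s).mp h))]
    cases hA : (s.toList.any fun c => PySem.Chars.isspace c) <;>
      cases hB : (PySem.Str.isIn "," s || PySem.Str.isIn ";" s) <;>
        cases hC : (s.toList.any fun c => decide (127 < c.toNat)) <;>
          first
            | exact absurd ((pvScan_iff_allowed s).mp ⟨hA, hB, hC⟩) hgood
            | simp

-- ===== VERDICT (by name: the statement is the Claim_ definition above) =====
theorem normalize_request_id_spec : Claim_equal_normalize_request_id := by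
  intro raw_value _
  show normalize_request_id raw_value = normalize_request_id_alt raw_value
  exact pvMain (PySem.Str.strip (raw_value.getD ""))
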